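-- pv_equiv track=rewrite | github.com/Emmyme/Docx_to_csv | script.py | find_field
-- ===== SOURCE A (Python) =====
-- FIELD_KEYWORDS = {
--     "KEYWORD_1": ["EXAMPLE_1", "EXAMPLE_2", "EXAMPLE_3", "EXAMPLE_4", "EXAMPLE_5", "EXAMPLE_6"],
--     "KEYWORD_2": ["EXAMPLE_1", "EXAMPLE_2", "EXAMPLE_3", "EXAMPLE_4", "EXAMPLE_5", "EXAMPLE_6"],
--     "KEYWORD_3": ["EXAMPLE_1", "EXAMPLE_2", "EXAMPLE_3", "EXAMPLE_4", "EXAMPLE_5", "EXAMPLE_6"],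
-- }
--
-- def find_field(text_content):
--     extracted = {field: "" for field in FIELD_KEYWORDS}
--
--     paragraphs = text_content.split('\n')
--
--     for text in paragraphs:
--         if not text.strip():
--             continue
--
--         info = text.strip().lower()
--
--         for field, keywords in FIELD_KEYWORDS.items():
--             for keyword in keywords:
--                 if keyword.lower() in info:
--                     parts = text.split(":")
--                     if len(parts) > 1:
--                         extracted[field] = parts[1].strip()
--                     else:
--                         extracted[field] = text.strip()
--                     break
--
--     return extracted
-- ===== SOURCE B (Python) =====
-- FIELD_KEYWORDS = {
--     "KEYWORD_1": ["EXAMPLE_1", "EXAMPLE_2", "EXAMPLE_3", "EXAMPLE_4", "EXAMPLE_5", "EXAMPLE_6"],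
--     "KEYWORD_2": ["EXAMPLE_1", "EXAMPLE_2", "EXAMPLE_3", "EXAMPLE_4", "EXAMPLE_5", "EXAMPLE_6"],
--     "KEYWORD_3": ["EXAMPLE_1", "EXAMPLE_2", "EXAMPLE_3", "EXAMPLE_4", "EXAMPLE_5", "EXAMPLE_6"],
-- }
--
-- def find_field(text_content):
--     # stage 1: one pass preparing (lowered search text, raw line) for the non-blank lines
--     lines = [(t.strip().lower(), t) for t in text_content.split('\n') if t.strip()]
--
--     # stage 2: per field, search the prepared lines BACK TO FRONT and stop at the
--     # first hit (= the last matching line), extracting the value only there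
--     def value_of(keywords):
--         kws = [k.lower() for k in keywords]
--         for info, raw in reversed(lines):
--             if any(k in info for k in kws):
--                 parts = raw.split(":")
--                 return parts[1].strip() if len(parts) > 1 else raw.strip()
--         return ""
--
--     return {field: value_of(kws) for field, kws in FIELD_KEYWORDS.items()}
-- ===== Notes on version B (the rewrite author's own statement) =====
-- stated objective: alternative
-- what changed: B first builds a prepared list of (lowered, raw) non-blank lines in one staged pass, then for each field searches that list BACK TO FRONT with early exit, returning at the first (i.e. last-in-order) matching line and doing the colon split only there, instead of A's forward per-paragraph sweep that repeatedly overwrites a pre-initialised dict via an inner break-on-first-keyword loop.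
import Mathlib
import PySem

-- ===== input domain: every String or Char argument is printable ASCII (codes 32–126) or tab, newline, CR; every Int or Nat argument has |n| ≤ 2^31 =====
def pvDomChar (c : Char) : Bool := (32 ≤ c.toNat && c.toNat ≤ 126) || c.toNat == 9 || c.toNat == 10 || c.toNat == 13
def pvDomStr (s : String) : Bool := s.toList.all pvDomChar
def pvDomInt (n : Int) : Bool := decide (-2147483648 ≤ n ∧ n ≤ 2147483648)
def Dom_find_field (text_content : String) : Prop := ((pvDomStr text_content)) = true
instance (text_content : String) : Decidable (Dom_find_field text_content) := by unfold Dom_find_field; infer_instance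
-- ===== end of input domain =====

-- B prepares the non-blank lines once and searches them back-to-front per field, returning at the
-- first (= last-in-order) match, instead of A's forward overwrite sweep; objective: alternative.

-- module-level constant FIELD_KEYWORDS (shared by both Python files)
def pvFIELD_KEYWORDS : List (String × List String) :=
  [("KEYWORD_1", ["EXAMPLE_1", "EXAMPLE_2", "EXAMPLE_3", "EXAMPLE_4", "EXAMPLE_5", "EXAMPLE_6"]),
   ("KEYWORD_2", ["EXAMPLE_1", "EXAMPLE_2", "EXAMPLE_3", "EXAMPLE_4", "EXAMPLE_5", "EXAMPLE_6"]),
   ("KEYWORD_3", ["EXAMPLE_1", "EXAMPLE_2", "EXAMPLE_3", "EXAMPLE_4", "EXAMPLE_5", "EXAMPLE_6"])]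

-- ===== PORT A =====
-- inner 'for keyword in keywords: … break' loop of A
def pvInnerA (info text field : String) (ex : PySem.Dict String String) :
    List String → PySem.Dict String String
  | [] => ex
  | kw :: rest =>
    if PySem.Str.isIn (PySem.Str.lower kw) info then
      let parts := (PySem.Str.split? text ":").getD []   -- sep ":" ≠ "", so split? is always some
      if parts.length > 1 then ex.insert field (PySem.Str.strip (PySem.List.pyGetD parts 1 ""))
      else ex.insert field (PySem.Str.strip text)
    else pvInnerA info text field ex rest

def find_field (text_content : String) : List (String × String) :=
  let extracted : PySem.Dict String String :=
    pvFIELD_KEYWORDS.foldl (fun d p => d.insert p.1 "") ⟨[]⟩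
  let paragraphs := (PySem.Str.split? text_content "\n").getD []
  (paragraphs.foldl (fun ex text =>
      if PySem.Str.strip text == "" then ex
      else
        let info := PySem.Str.lower (PySem.Str.strip text)
        pvFIELD_KEYWORDS.foldl (fun ex p => pvInnerA info text p.1 ex p.2) ex)
    extracted).items

-- ===== PORT B =====
-- stage 1: prepared (lowered, raw) non-blank lines
def pvLinesB (text_content : String) : List (String × String) :=
  (((PySem.Str.split? text_content "\n").getD []).filter
      (fun t => !(PySem.Str.strip t == ""))).map
    (fun t => (PySem.Str.lower (PySem.Str.strip t), t))

-- stage 2: B's 'for … in reversed(lines): … return …' early-exit search (argument list already reversed)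
def pvValueOf (kws : List (String)) : List (String × String) → String
  | [] => ""
  | (info, raw) :: rest =>
    if kws.any (fun k => PySem.Str.isIn k info) then
      let parts := (PySem.Str.split? raw ":").getD []
      if parts.length > 1 then PySem.Str.strip (PySem.List.pyGetD parts 1 "")
      else PySem.Str.strip raw
    else pvValueOf kws rest

def find_field_alt (text_content : String) : List (String × String) :=
  let lines := pvLinesB text_content
  (pvFIELD_KEYWORDS.foldl
      (fun d p => d.insert p.1 (pvValueOf (p.2.map PySem.Str.lower) lines.reverse))
      (⟨[]⟩ : PySem.Dict String String)).items

-- ===== PRECONDITION & SPEC =====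
def Spec_find_field (text_content : String) (out : List (String × String)) : Prop := out = find_field_alt text_content
instance (text_content : String) (out : List (String × String)) : Decidable (Spec_find_field text_content out) := by unfold Spec_find_field; infer_instance

-- ===== CLAIM (what is proved, stated in full; the proofs are below) =====
def Claim_equal_find_field : Prop := ∀ (text_content : String), Dom_find_field text_content → Spec_find_field text_content (find_field text_content)

-- ===== LEMMAS AND PROOFS =====

-- the common keyword list
def pvKW : List String := ["EXAMPLE_1", "EXAMPLE_2", "EXAMPLE_3", "EXAMPLE_4", "EXAMPLE_5", "EXAMPLE_6"]

-- the candidate value a matching paragraph contributes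
def pvCand (text : String) : String :=
  let parts := (PySem.Str.split? text ":").getD []
  if parts.length > 1 then PySem.Str.strip (PySem.List.pyGetD parts 1 "")
  else PySem.Str.strip text

def pvMatch (info : String) (kws : List String) : Bool :=
  kws.any (fun kw => PySem.Str.isIn (PySem.Str.lower kw) info)

-- A's per-paragraph step, named (definitionally equal to the lambda in find_field)
def pvOuterA (ex : PySem.Dict String String) (text : String) : PySem.Dict String String :=
  if PySem.Str.strip text == "" then ex
  else
    let info := PySem.Str.lower (PySem.Str.strip text)
    pvFIELD_KEYWORDS.foldl (fun ex p => pvInnerA info text p.1 ex p.2) ex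

-- A's per-paragraph update on one field value, abstracted
def pvStepB (value text : String) : String :=
  if pvMatch (PySem.Str.lower (PySem.Str.strip text)) pvKW then pvCand text else value

-- the prepared pair of one raw line (B's stage 1)
def pvPair (t : String) : String × String := (PySem.Str.lower (PySem.Str.strip t), t)

-- A's break-on-first-keyword loop is 'if any keyword matches, insert the candidate'
theorem pvInnerA_eq (info text field : String) (ex : PySem.Dict String String)
    (kws : List String) :
    pvInnerA info text field ex kws =
      if pvMatch info kws then ex.insert field (pvCand text) else ex := by
  induction kws with
  | nil => simp [pvInnerA, pvMatch]
  | cons kw rest ih =>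
    have hcons : pvMatch info (kw :: rest)
        = (PySem.Str.isIn (PySem.Str.lower kw) info || pvMatch info rest) := rfl
    by_cases h : PySem.Str.isIn (PySem.Str.lower kw) info = true
    · rw [show pvMatch info (kw :: rest) = true from by rw [hcons, h, Bool.true_or]]
      simp only [pvInnerA, h, if_true, pvCand]
      split_ifs <;> rfl
    · have hF : PySem.Str.isIn (PySem.Str.lower kw) info = false := by
        revert h; cases PySem.Str.isIn (PySem.Str.lower kw) info <;> simp
      rw [show pvMatch info (kw :: rest) = pvMatch info rest from by
        rw [hcons, hF, Bool.false_or]]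
      simp only [pvInnerA, hF, if_false, Bool.false_eq_true]
      exact ih

-- one non-blank paragraph updates all three fields uniformly
theorem pvStepA (info text a b c : String) :
    pvFIELD_KEYWORDS.foldl (fun ex p => pvInnerA info text p.1 ex p.2)
      ⟨[("KEYWORD_1", a), ("KEYWORD_2", b), ("KEYWORD_3", c)]⟩ =
    ⟨[("KEYWORD_1", if pvMatch info pvKW then pvCand text else a),
      ("KEYWORD_2", if pvMatch info pvKW then pvCand text else b),
      ("KEYWORD_3", if pvMatch info pvKW then pvCand text else c)]⟩ := by
  simp only [pvFIELD_KEYWORDS, pvKW, List.foldl, pvInnerA_eq]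
  by_cases h : pvMatch info ["EXAMPLE_1", "EXAMPLE_2", "EXAMPLE_3", "EXAMPLE_4", "EXAMPLE_5", "EXAMPLE_6"] = true
  · simp only [h, if_true]; rfl
  · simp only [h, if_false, Bool.false_eq_true]

-- main invariant for A: its fold acts independently on the three values; skipping blanks = folding the filtered list
theorem pvMain (ps : List String) (a b c : String) :
    ps.foldl pvOuterA ⟨[("KEYWORD_1", a), ("KEYWORD_2", b), ("KEYWORD_3", c)]⟩ =
    ⟨[("KEYWORD_1", (ps.filter (fun p => !(PySem.Str.strip p == ""))).foldl pvStepB a),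
      ("KEYWORD_2", (ps.filter (fun p => !(PySem.Str.strip p == ""))).foldl pvStepB b),
      ("KEYWORD_3", (ps.filter (fun p => !(PySem.Str.strip p == ""))).foldl pvStepB c)]⟩ := by
  induction ps generalizing a b c with
  | nil => rfl
  | cons t rest ih =>
    rw [List.foldl_cons, List.filter_cons]
    by_cases h : (PySem.Str.strip t == "") = true
    · rw [show pvOuterA ⟨[("KEYWORD_1", a), ("KEYWORD_2", b), ("KEYWORD_3", c)]⟩ t
            = ⟨[("KEYWORD_1", a), ("KEYWORD_2", b), ("KEYWORD_3", c)]⟩ from by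
          simp [pvOuterA, h]]
      rw [if_neg (by simp [h]), ih]
    · rw [show pvOuterA ⟨[("KEYWORD_1", a), ("KEYWORD_2", b), ("KEYWORD_3", c)]⟩ t
            = ⟨[("KEYWORD_1", pvStepB a t), ("KEYWORD_2", pvStepB b t), ("KEYWORD_3", pvStepB c t)]⟩ from by
          simp only [pvOuterA, h, if_false, Bool.false_eq_true]
          exact pvStepA _ t a b c]
      rw [if_pos (by simp [h]), ih, List.foldl_cons, List.foldl_cons, List.foldl_cons]

-- B's lowered-keyword any-test equals A's test on a prepared pair
theorem pvTest_eq (info : String) :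
    (pvKW.map PySem.Str.lower).any (fun k => PySem.Str.isIn k info) = pvMatch info pvKW := by
  simp [List.any_map, pvMatch, Function.comp_def, PySem.Str.toList_lower]

-- generalized back-to-front search with an explicit miss value
def pvGoD (v : String) : List (String × String) → String
  | [] => v
  | (info, raw) :: rest =>
    if (pvKW.map PySem.Str.lower).any (fun k => PySem.Str.isIn k info) then pvCand raw
    else pvGoD v rest

theorem pvGoD_empty (l : List (String × String)) :
    pvGoD "" l = pvValueOf (pvKW.map PySem.Str.lower) l := by
  induction l with
  | nil => rfl
  | cons p rest ih =>
    obtain ⟨info, raw⟩ := p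
    simp only [pvGoD, pvValueOf, pvCand]
    split_ifs <;> simp_all

theorem pvFoldl_eq_goD (ps : List String) (v : String) :
    ps.foldl pvStepB v = pvGoD v ((ps.map pvPair).reverse) := by
  induction ps using List.reverseRecOn generalizing v with
  | nil => rfl
  | append_singleton ps t ih =>
    rw [List.foldl_append, List.foldl_cons, List.foldl_nil]
    rw [List.map_append, List.reverse_append]
    simp only [List.map_cons, List.map_nil, List.reverse_cons, List.reverse_nil,
      List.nil_append, List.cons_append]
    show pvStepB (ps.foldl pvStepB v) t = pvGoD v (pvPair t :: (ps.map pvPair).reverse)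
    simp only [pvGoD, pvPair, pvTest_eq, pvStepB]
    split_ifs with h
    · rfl
    · exact ih v

-- ===== VERDICT (by name: the statement is the Claim_ definition above) =====
theorem find_field_spec : Claim_equal_find_field := by
  intro text_content _
  unfold Spec_find_field
  show (((PySem.Str.split? text_content "\n").getD []).foldl pvOuterA
          ⟨[("KEYWORD_1", ""), ("KEYWORD_2", ""), ("KEYWORD_3", "")]⟩).items
      = find_field_alt text_content
  rw [pvMain]
  have hval : ∀ ps : List String,
      ps.foldl pvStepB "" = pvValueOf (pvKW.map PySem.Str.lower) ((ps.map pvPair).reverse) := by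
    intro ps; rw [pvFoldl_eq_goD, pvGoD_empty]
  rw [hval]
  rfl
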